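-- pv_equiv track=rewrite | github.com/Nemo-sop/pathfinder | agents.py | obtener_coordenadas_en_radio
-- ===== SOURCE A (Python) =====
-- def obtener_coordenadas_en_radio(punto_central, radio=8):
--     puntos_en_radio = []
--     x_central, y_central = punto_central
--
--     for x in range(x_central - radio, x_central + radio + 1):
--         for y in range(y_central - radio, y_central + radio + 1):
--             distancia = abs(x - x_central) + abs(y - y_central)
--             if distancia <= radio:
--                 puntos_en_radio.append((x, y))
--
--     return puntos_en_radio
-- ===== SOURCE B (Python) =====
-- def obtener_coordenadas_en_radio(punto_central, radio=8):
--     x_central, y_central = punto_central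
--     return [(x_central + dx, y_central + dy)
--             for dx in range(-radio, radio + 1)
--             for dy in range(abs(dx) - radio, radio - abs(dx) + 1)]
-- ===== Notes on version B (the rewrite author's own statement) =====
-- stated objective: simpler
-- what changed: B is a single flat comprehension over centered offsets (dx, dy) with the inner bound derived from the remaining Manhattan budget, replacing A's nested accumulator loops with their per-point distance test and filter branch.
import Mathlib
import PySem

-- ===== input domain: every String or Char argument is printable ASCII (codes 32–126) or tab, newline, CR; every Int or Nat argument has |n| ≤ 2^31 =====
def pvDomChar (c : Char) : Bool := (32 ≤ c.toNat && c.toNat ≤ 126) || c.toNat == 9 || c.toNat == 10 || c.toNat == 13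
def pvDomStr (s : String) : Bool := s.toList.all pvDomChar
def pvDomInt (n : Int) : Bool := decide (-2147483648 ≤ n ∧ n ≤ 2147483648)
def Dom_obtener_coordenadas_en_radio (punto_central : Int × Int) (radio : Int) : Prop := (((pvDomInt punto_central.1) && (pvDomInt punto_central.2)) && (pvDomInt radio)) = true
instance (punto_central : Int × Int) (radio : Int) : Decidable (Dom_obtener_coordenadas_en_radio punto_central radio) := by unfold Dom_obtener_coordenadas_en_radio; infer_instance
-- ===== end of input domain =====

-- B is simpler: one flat comprehension over centered offsets (dx, dy) whose inner bound
-- is the remaining Manhattan budget, so A's nested accumulator loops and distance test disappear.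

-- ===== PORT A =====
def obtener_coordenadas_en_radio (punto_central : Int × Int) (radio : Int) : List (Int × Int) :=
  let x_central := punto_central.1
  let y_central := punto_central.2
  (PySem.List.pyRange (x_central - radio) (x_central + radio + 1) 1).foldl
    (fun puntos x =>
      (PySem.List.pyRange (y_central - radio) (y_central + radio + 1) 1).foldl
        (fun puntos y =>
          let distancia := |x - x_central| + |y - y_central|
          if distancia ≤ radio then puntos ++ [(x, y)] else puntos)
        puntos)
    []

-- ===== PORT B =====
def obtener_coordenadas_en_radio_alt (punto_central : Int × Int) (radio : Int) : List (Int × Int) :=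
  (PySem.List.pyRange (-radio) (radio + 1) 1).flatMap (fun dx =>
    (PySem.List.pyRange (|dx| - radio) (radio - |dx| + 1) 1).map
      (fun dy => (punto_central.1 + dx, punto_central.2 + dy)))

-- ===== PRECONDITION & SPEC =====
def Spec_obtener_coordenadas_en_radio (punto_central : Int × Int) (radio : Int) (out : List (Int × Int)) : Prop := out = obtener_coordenadas_en_radio_alt punto_central radio
instance (punto_central : Int × Int) (radio : Int) (out : List (Int × Int)) : Decidable (Spec_obtener_coordenadas_en_radio punto_central radio out) := by unfold Spec_obtener_coordenadas_en_radio; infer_instance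

-- ===== CLAIM (what is proved, stated in full; the proofs are below) =====
def Claim_equal_obtener_coordenadas_en_radio : Prop := ∀ (punto_central : Int × Int) (radio : Int), Dom_obtener_coordenadas_en_radio punto_central radio → Spec_obtener_coordenadas_en_radio punto_central radio (obtener_coordenadas_en_radio punto_central radio)

-- ===== LEMMAS AND PROOFS =====

-- 'if p(x): out.append(f(x))' over a loop is append of map-of-filter (Prop-test version)
theorem pv_foldl_append_ite {α β : Type} (p : α → Prop) [DecidablePred p] (f : α → β)
    (l : List α) (acc : List β) :
    l.foldl (fun acc x => if p x then acc ++ [f x] else acc) acc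
      = acc ++ (l.filter (fun x => decide (p x))).map f := by
  induction l generalizing acc with
  | nil => simp
  | cons a t ih =>
    by_cases h : p a <;> simp [List.foldl_cons, ih, h]

-- filtering the full y-range by the Manhattan test equals the narrowed range
theorem pv_filter_range (x_central y_central radio x : Int)
    (hx1 : x_central - radio ≤ x) (hx2 : x < x_central + radio + 1) :
    (PySem.List.pyRange (y_central - radio) (y_central + radio + 1) 1).filter
        (fun y => decide (|x - x_central| + |y - y_central| ≤ radio))
      = PySem.List.pyRange (y_central - (radio - |x - x_central|))
          (y_central + (radio - |x - x_central|) + 1) 1 := by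
  set m := |x - x_central| with hm
  have hm0 : 0 ≤ m := abs_nonneg _
  have hmr : m ≤ radio := by
    rcases abs_cases (x - x_central) with ⟨h, _⟩ | ⟨h, _⟩ <;> omega
  rw [PySem.List.pyRange_one_append (y_central - radio) (y_central - (radio - m))
        (y_central + radio + 1) (by omega) (by omega),
      PySem.List.pyRange_one_append (y_central - (radio - m)) (y_central + (radio - m) + 1)
        (y_central + radio + 1) (by omega) (by omega)]
  rw [List.filter_append, List.filter_append]
  have hleft : (PySem.List.pyRange (y_central - radio) (y_central - (radio - m)) 1).filter
      (fun y => decide (|x - x_central| + |y - y_central| ≤ radio)) = [] := by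
    rw [List.filter_eq_nil_iff]
    intro y hy
    rw [PySem.List.mem_pyRange_one] at hy
    simp only [← hm, decide_eq_true_eq, not_le]
    rcases abs_cases (y - y_central) with ⟨h, _⟩ | ⟨h, _⟩ <;> omega
  have hmid : (PySem.List.pyRange (y_central - (radio - m)) (y_central + (radio - m) + 1) 1).filter
      (fun y => decide (|x - x_central| + |y - y_central| ≤ radio))
      = PySem.List.pyRange (y_central - (radio - m)) (y_central + (radio - m) + 1) 1 := by
    rw [List.filter_eq_self]
    intro y hy
    rw [PySem.List.mem_pyRange_one] at hy
    simp only [← hm, decide_eq_true_eq]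
    rcases abs_cases (y - y_central) with ⟨h, _⟩ | ⟨h, _⟩ <;> omega
  have hright : (PySem.List.pyRange (y_central + (radio - m) + 1) (y_central + radio + 1) 1).filter
      (fun y => decide (|x - x_central| + |y - y_central| ≤ radio)) = [] := by
    rw [List.filter_eq_nil_iff]
    intro y hy
    rw [PySem.List.mem_pyRange_one] at hy
    simp only [← hm, decide_eq_true_eq, not_le]
    rcases abs_cases (y - y_central) with ⟨h, _⟩ | ⟨h, _⟩ <;> omega
  rw [hleft, hmid, hright]
  simp

-- shifting a unit range: pyRange (c+a) (c+b) is pyRange a b translated by c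
theorem pv_pyRange_shift (c a b : Int) :
    PySem.List.pyRange (c + a) (c + b) 1 = (PySem.List.pyRange a b 1).map (fun k => c + k) := by
  rw [PySem.List.pyRange_one, PySem.List.pyRange_one]
  have : c + b - (c + a) = b - a := by ring
  rw [this, List.map_map]
  exact List.map_congr_left (fun k _ => by simp [Function.comp]; ring)

-- ===== VERDICT (by name: the statement is the Claim_ definition above) =====
theorem obtener_coordenadas_en_radio_spec : Claim_equal_obtener_coordenadas_en_radio := by
  intro punto_central radio _
  unfold Spec_obtener_coordenadas_en_radio obtener_coordenadas_en_radio obtener_coordenadas_en_radio_alt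
  obtain ⟨x_central, y_central⟩ := punto_central
  simp only
  -- step 1: rewrite A's inner loop into 'append the narrowed row'
  have hA : ∀ (l : List Int) (acc : List (Int × Int)),
      (∀ x ∈ l, x_central - radio ≤ x ∧ x < x_central + radio + 1) →
      l.foldl (fun puntos x =>
        (PySem.List.pyRange (y_central - radio) (y_central + radio + 1) 1).foldl
          (fun puntos y =>
            if |x - x_central| + |y - y_central| ≤ radio then puntos ++ [(x, y)] else puntos)
          puntos) acc
      = l.foldl (fun puntos x =>
          puntos ++ (PySem.List.pyRange (y_central - (radio - |x - x_central|))
            (y_central + (radio - |x - x_central|) + 1) 1).map (fun y => (x, y))) acc := by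
    intro l
    induction l with
    | nil => intro acc _; rfl
    | cons a t ih =>
      intro acc hmem
      simp only [List.foldl_cons]
      rw [pv_foldl_append_ite (fun y => |a - x_central| + |y - y_central| ≤ radio) (fun y => (a, y)),
          pv_filter_range x_central y_central radio a (hmem a (List.mem_cons_self ..)).1
            (hmem a (List.mem_cons_self ..)).2,
          ih _ (fun x hx => hmem x (List.mem_cons_of_mem _ hx))]
  rw [hA _ [] (fun x hx => by rw [PySem.List.mem_pyRange_one] at hx; exact hx)]
  -- step 2: foldl-append is flatMap
  rw [PySem.List.foldl_append_eq_flatMap]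
  simp only [List.nil_append]
  -- step 3: shift the x-range to offsets dx, then each y-range to offsets dy
  have hx : PySem.List.pyRange (x_central - radio) (x_central + radio + 1) 1
      = (PySem.List.pyRange (-radio) (radio + 1) 1).map (fun dx => x_central + dx) := by
    have h1 : x_central - radio = x_central + (-radio) := by ring
    have h2 : x_central + radio + 1 = x_central + (radio + 1) := by ring
    rw [h1, h2, pv_pyRange_shift]
  rw [hx, List.flatMap_map]
  refine List.flatMap_congr ?_
  intro dx _
  have habs : |x_central + dx - x_central| = |dx| := by
    have : x_central + dx - x_central = dx := by ring
    rw [this]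
  rw [habs]
  have h1 : y_central - (radio - |dx|) = y_central + (|dx| - radio) := by ring
  have h2 : y_central + (radio - |dx|) + 1 = y_central + (radio - |dx| + 1) := by ring
  rw [h1, h2, pv_pyRange_shift, List.map_map]
  rfl
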